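-- pv_equiv track=rewrite | github.com/CSID-DGU/2025-2-CSC4004-1-7-Libri | main.py | convert_joint_action_to_signal
-- ===== SOURCE A (Python) =====
-- def convert_joint_action_to_signal(joint_action, action_map):
--     action_to_score = {"Long": 1, "Hold": 0, "Short": -1}
--     # (joint_action은 (a0, a1, a2, a3) 튜플이 됨)
--     score = sum(action_to_score[action_map[a]] for a in joint_action)
--
--     if score >= 3:
--         return "적극 매수"
--     elif score == 2 or score == 1:
--         return "매수"
--     elif score == 0:
--         return "보유"
--     elif score == -1 or score == -2:
--         return "매도"
--     elif score <= -3: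
--         return "적극 매도"
--     return "보유" # 기본값
-- ===== SOURCE B (Python) =====
-- def convert_joint_action_to_signal(joint_action, action_map):
--     # recursively accumulate the score of the mapped actions
--     def score(acts):
--         if not acts:
--             return 0
--         return {"Long": 1, "Hold": 0, "Short": -1}[action_map[acts[0]]] + score(acts[1:])
--     # clamp the score into [-3, 3] and look the label up directly
--     clamped = max(-3, min(3, score(list(joint_action))))
--     return {-3: "적극 매도", -2: "매도", -1: "매도",
--             0: "보유",
--             1: "매수", 2: "매수", 3: "적극 매수"}[clamped]
-- ===== Notes on version B (the rewrite author's own statement) =====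
-- stated objective: alternative
-- what changed: Replaces the generator-sum with a recursive score function over the action tuple, and replaces the five-way if/elif cascade by clamping the score into [-3,3] and looking the label up in a precomputed 7-entry dict, removing the unreachable trailing default.
import Mathlib
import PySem

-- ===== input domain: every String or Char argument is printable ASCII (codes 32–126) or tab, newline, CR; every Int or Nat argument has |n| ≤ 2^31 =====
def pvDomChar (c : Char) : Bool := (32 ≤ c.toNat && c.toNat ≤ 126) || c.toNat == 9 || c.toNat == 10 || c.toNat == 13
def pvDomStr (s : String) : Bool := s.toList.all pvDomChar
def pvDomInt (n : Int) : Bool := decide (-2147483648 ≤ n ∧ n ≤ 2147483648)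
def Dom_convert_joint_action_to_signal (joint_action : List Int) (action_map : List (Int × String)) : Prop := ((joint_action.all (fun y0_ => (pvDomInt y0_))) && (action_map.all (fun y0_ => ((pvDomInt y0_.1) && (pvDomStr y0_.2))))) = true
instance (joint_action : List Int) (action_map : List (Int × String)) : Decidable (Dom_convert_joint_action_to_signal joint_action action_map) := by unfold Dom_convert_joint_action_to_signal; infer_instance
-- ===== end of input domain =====

-- B computes the score by structural recursion and buckets it by clamping into [-3,3] plus a 7-entry dict lookup instead of the if/elif cascade (alternative; return value only).

-- ===== PORT A =====
-- the literal dict {"Long": 1, "Hold": 0, "Short": -1}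
def pvActionToScore : PySem.Dict String Int :=
  ((PySem.Dict.empty.insert "Long" 1).insert "Hold" 0).insert "Short" (-1)

-- sum(action_to_score[action_map[a]] for a in joint_action); none = KeyError
def pvScoreA (joint_action : List Int) (action_map : List (Int × String)) : Option Int :=
  joint_action.foldl
    (fun acc a => acc.bind (fun s =>
      ((PySem.Dict.mk action_map).get? a).bind (fun act =>
        (pvActionToScore.get? act).map (fun v => s + v))))
    (some 0)

def convert_joint_action_to_signal (joint_action : List Int) (action_map : List (Int × String)) : String :=
  match pvScoreA joint_action action_map with
  | none => ""   -- KeyError in Python; excluded by Pre_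
  | some score =>
    if score ≥ 3 then "적극 매수"
    else if score = 2 ∨ score = 1 then "매수"
    else if score = 0 then "보유"
    else if score = -1 ∨ score = -2 then "매도"
    else if score ≤ -3 then "적극 매도"
    else "보유"

-- ===== PORT B =====
-- recursive score(acts) of Source B; none = KeyError
def pvScoreB (action_map : List (Int × String)) : List Int → Option Int
  | [] => some 0
  | a :: tl =>
    ((PySem.Dict.mk action_map).get? a).bind (fun act =>
      (((((PySem.Dict.empty.insert "Long" 1).insert "Hold" 0).insert "Short" (-1) : PySem.Dict String Int)).get? act).bind (fun h =>
        (pvScoreB action_map tl).map (fun r => h + r)))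

-- the literal 7-entry label dict of Source B
def pvLabels : PySem.Dict Int String :=
  ((((((PySem.Dict.empty.insert (-3) "적극 매도").insert (-2) "매도").insert (-1) "매도").insert 0 "보유").insert 1 "매수").insert 2 "매수").insert 3 "적극 매수"

def convert_joint_action_to_signal_alt (joint_action : List Int) (action_map : List (Int × String)) : String :=
  match pvScoreB action_map joint_action with
  | none => ""   -- KeyError in Python; excluded by Pre_
  | some s =>
    match pvLabels.get? (max (-3) (min 3 s)) with
    | some l => l
    | none => ""   -- unreachable: the clamped score is always a key

-- ===== PRECONDITION & SPEC =====
-- Pre_ excludes exactly the inputs where Python A raises KeyError: some a has no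
-- entry in action_map, or its mapped string is not one of "Long"/"Hold"/"Short".
def Pre_convert_joint_action_to_signal (joint_action : List Int) (action_map : List (Int × String)) : Prop :=
  (joint_action.all (fun a =>
    match (PySem.Dict.mk action_map).get? a with
    | some s => s == "Long" || s == "Hold" || s == "Short"
    | none => false)) = true
instance (joint_action : List Int) (action_map : List (Int × String)) : Decidable (Pre_convert_joint_action_to_signal joint_action action_map) := by unfold Pre_convert_joint_action_to_signal; infer_instance

def pvWitness_convert_joint_action_to_signal : List Int × (List (Int × String)) :=
  ([0, 1, 0], [(0, "Long"), (1, "Short")])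

def Spec_convert_joint_action_to_signal (joint_action : List Int) (action_map : List (Int × String)) (out : String) : Prop := out = convert_joint_action_to_signal_alt joint_action action_map
instance (joint_action : List Int) (action_map : List (Int × String)) (out : String) : Decidable (Spec_convert_joint_action_to_signal joint_action action_map out) := by unfold Spec_convert_joint_action_to_signal; infer_instance

-- ===== CLAIM (what is proved, stated in full; the proofs are below) =====
def Claim_equal_convert_joint_action_to_signal : Prop := ∀ (joint_action : List Int) (action_map : List (Int × String)), Dom_convert_joint_action_to_signal joint_action action_map → Pre_convert_joint_action_to_signal joint_action action_map → Spec_convert_joint_action_to_signal joint_action action_map (convert_joint_action_to_signal joint_action action_map)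

-- ===== LEMMAS AND PROOFS =====

-- A's foldl from a dead (none) accumulator stays none
lemma pvFoldl_none (action_map : List (Int × String)) (tl : List Int) :
    tl.foldl
      (fun acc a => acc.bind (fun s =>
        ((PySem.Dict.mk action_map).get? a).bind (fun act =>
          (pvActionToScore.get? act).map (fun v => s + v))))
      none = none := by
  induction tl with
  | nil => rfl
  | cons b tb ih => simpa using ih

-- A's foldl with initial accumulator s0 equals s0 + B's recursive score
lemma pvScoreA_eq (joint_action : List Int) (action_map : List (Int × String)) (s0 : Int) :
    joint_action.foldl
      (fun acc a => acc.bind (fun s =>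
        ((PySem.Dict.mk action_map).get? a).bind (fun act =>
          (pvActionToScore.get? act).map (fun v => s + v))))
      (some s0)
    = (pvScoreB action_map joint_action).map (fun r => s0 + r) := by
  induction joint_action generalizing s0 with
  | nil => simp [pvScoreB]
  | cons a tl ih =>
    rw [List.foldl_cons, pvScoreB, Option.bind_some]
    cases hg : (PySem.Dict.mk action_map).get? a with
    | none => rw [Option.bind_none, pvFoldl_none, Option.bind_none, Option.map_none]
    | some act =>
      rw [Option.bind_some, Option.bind_some]
      cases hv : pvActionToScore.get? act with
      | none =>
        rw [show (((((PySem.Dict.empty.insert "Long" 1).insert "Hold" 0).insert "Short" (-1) : PySem.Dict String Int)).get? act) = none from hv,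
          Option.map_none, Option.bind_none, pvFoldl_none, Option.map_none]
      | some v =>
        rw [show (((((PySem.Dict.empty.insert "Long" 1).insert "Hold" 0).insert "Short" (-1) : PySem.Dict String Int)).get? act) = some v from hv,
          Option.map_some, Option.bind_some, ih (s0 + v)]
        cases pvScoreB action_map tl <;> simp <;> ring

-- the cascade equals clamp-then-dict-lookup
lemma pvBucket_eq (s : Int) :
    (if s ≥ 3 then "적극 매수"
     else if s = 2 ∨ s = 1 then "매수"
     else if s = 0 then "보유"
     else if s = -1 ∨ s = -2 then "매도"
     else if s ≤ -3 then "적극 매도"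
     else "보유")
    = (match pvLabels.get? (max (-3) (min 3 s)) with
       | some l => l
       | none => "") := by
  by_cases h : 3 ≤ s
  · have hc : max (-3) (min 3 s) = 3 := by omega
    rw [hc]; simp only [ge_iff_le, h, if_pos]; decide
  · by_cases h' : s ≤ -3
    · have hc : max (-3) (min 3 s) = -3 := by omega
      rw [hc]
      have : ¬ (3 ≤ s) := by omega
      split_ifs <;> first | decide | omega
    · have hc : max (-3) (min 3 s) = s := by omega
      rw [hc]
      interval_cases s <;> decide

-- ===== VERDICT (by name: the statement is the Claim_ definition above) =====
theorem convert_joint_action_to_signal_spec : Claim_equal_convert_joint_action_to_signal := by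
  intro ja am _ _
  unfold Spec_convert_joint_action_to_signal convert_joint_action_to_signal
    convert_joint_action_to_signal_alt pvScoreA
  rw [pvScoreA_eq ja am 0]
  cases pvScoreB am ja with
  | none => rfl
  | some s => simpa using pvBucket_eq s
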